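-- pv_equiv track=rewrite | github.com/dneupan1/csi5370project | RQ1/test_Problem21_NLP_To_test.py | countGreatPartitions
-- ===== SOURCE A (Python) =====
-- def countGreatPartitions(nums, k):
--     """
--     Counts the number of distinct great partitions where each partition has a sum greater than or equal to k.
--
--     Args:
--     nums (List[int]): List of positive integers.
--     k (int): Minimum sum required for each partition to be considered great.
--
--     Returns:
--     int: Number of distinct great partitions modulo 10**9 + 7.
--
--     Explanation:
--     We use bitmasking to generate all possible partitions of the array into two groups.
--     Each bit in the bitmask represents whether the element at that index belongs to the first or second group.
--     We then check if both groups have a sum >= k. If they do, we increment the count.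
--     """
--     MOD = 10**9 + 7
--     n = len(nums)
--     count = 0
--
--     # Iterate over all possible partitions using bitmasking
--     for mask in range(1, 1 << n):
--         sum1 = sum2 = 0
--
--         # Determine sums of two groups based on the bitmask
--         for i in range(n):
--             if mask & (1 << i):
--                 sum1 += nums[i]
--             else:
--                 sum2 += nums[i]
--
--         # Check if both partitions are "great"
--         if sum1 >= k and sum2 >= k:
--             count += 1
--
--     # The result needs to be divided by 2 because each partition is counted twice
--     return count // 2 % MOD
-- ===== SOURCE B (Python) =====
-- def countGreatPartitions(nums, k):
--     # Enumerate subset sums once by doubling (no bitmask / no inner index loop),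
--     # count sums s with s >= k and S - s >= k, correct for the empty subset, halve.
--     MOD = 10**9 + 7
--     S = sum(nums)
--     sums = [0]
--     for x in nums:
--         sums += [s + x for s in sums]
--     total = sum(1 for s in sums if s >= k and S - s >= k)
--     if k <= 0 <= S - k:
--         total -= 1
--     return total // 2 % MOD
-- ===== Notes on version B (the rewrite author's own statement) =====
-- stated objective: alternative
-- what changed: Replaces the bitmask double loop (every mask, inner index loop re-deriving both group sums) by one subset-sum list built by doubling plus a single counting pass that derives the complement sum from the total, with an explicit -1 correction for the empty subset; this removes A's inner O(n) loop per mask (measured ~16x at n=16) though both remain exponential.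
import Mathlib
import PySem

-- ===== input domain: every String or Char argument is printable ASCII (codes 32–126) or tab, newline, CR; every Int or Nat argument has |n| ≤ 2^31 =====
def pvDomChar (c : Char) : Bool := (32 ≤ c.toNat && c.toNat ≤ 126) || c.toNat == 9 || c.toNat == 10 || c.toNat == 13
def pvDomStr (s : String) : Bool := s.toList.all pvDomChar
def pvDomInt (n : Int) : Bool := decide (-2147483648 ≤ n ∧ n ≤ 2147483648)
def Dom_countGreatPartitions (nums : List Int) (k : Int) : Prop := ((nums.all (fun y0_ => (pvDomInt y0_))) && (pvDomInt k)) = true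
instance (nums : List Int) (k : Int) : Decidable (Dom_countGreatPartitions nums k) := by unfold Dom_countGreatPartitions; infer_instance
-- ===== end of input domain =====

-- B replaces A's bitmask double loop by a single subset-sum list built by doubling
-- plus one counting pass (a different algorithm: no bitmasks, no inner index loop).


-- ===== PORT A =====
-- A's inner loop: the two group sums (sum1, sum2) of `nums` under bitmask `mask`.
def cgpSums (nums : List Int) (mask : Int) : Int × Int :=
  (PySem.List.pyRange 0 (nums.length : Int)).foldl
    (fun s i =>
      if PySem.Int.band mask ((1 : Int) <<< i) ≠ 0 then
        (s.1 + PySem.List.pyGetD nums i 0, s.2)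
      else
        (s.1, s.2 + PySem.List.pyGetD nums i 0))
    (0, 0)

def countGreatPartitions (nums : List Int) (k : Int) : Int :=
  let MOD : Int := 10 ^ 9 + 7
  let n : Int := (nums.length : Int)
  let count : Int :=
    (PySem.List.pyRange 1 ((1 : Int) <<< n)).foldl
      (fun count mask =>
        let s := cgpSums nums mask
        if s.1 ≥ k ∧ s.2 ≥ k then count + 1 else count)
      0
  PySem.Int.mod (PySem.Int.floordiv count 2) MOD

-- ===== PORT B =====
def countGreatPartitions_alt (nums : List Int) (k : Int) : Int :=
  let MOD : Int := 10 ^ 9 + 7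
  let S : Int := nums.sum
  let sums : List Int := nums.foldl (fun out x => out ++ out.map (fun s => s + x)) [0]
  let total : Int := sums.foldl (fun t s => if s ≥ k ∧ S - s ≥ k then t + 1 else t) 0
  let total2 : Int := if k ≤ 0 ∧ 0 ≤ S - k then total - 1 else total
  PySem.Int.mod (PySem.Int.floordiv total2 2) MOD

-- ===== PRECONDITION & SPEC =====
def Spec_countGreatPartitions (nums : List Int) (k : Int) (out : Int) : Prop := out = countGreatPartitions_alt nums k
instance (nums : List Int) (k : Int) (out : Int) : Decidable (Spec_countGreatPartitions nums k out) := by unfold Spec_countGreatPartitions; infer_instance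

-- ===== CLAIM (what is proved, stated in full; the proofs are below) =====
def Claim_equal_countGreatPartitions : Prop := ∀ (nums : List Int) (k : Int), Dom_countGreatPartitions nums k → Spec_countGreatPartitions nums k (countGreatPartitions nums k)

-- ===== LEMMAS AND PROOFS =====

-- B's doubling list, named for the proofs (definitionally B's fold).
def pvDbl (nums : List Int) : List Int :=
  nums.foldl (fun out x => out ++ out.map (fun s => s + x)) [0]

theorem pvDbl_append (nums : List Int) (x : Int) :
    pvDbl (nums ++ [x]) = pvDbl nums ++ (pvDbl nums).map (fun s => s + x) := by
  simp [pvDbl, List.foldl_append]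

theorem pvShift (t : Nat) : (1 : Int) <<< ((t : Nat) : Int) = ((2 ^ t : Nat) : Int) := by
  rw [Int.shiftLeft_natCast_right, Int.shiftLeft_eq]
  push_cast; ring

theorem cgpSums_append (nums : List Int) (x mask : Int) :
    cgpSums (nums ++ [x]) mask =
      (if PySem.Int.band mask ((1 : Int) <<< (nums.length : Int)) ≠ 0 then
        ((cgpSums nums mask).1 + x, (cgpSums nums mask).2)
      else
        ((cgpSums nums mask).1, (cgpSums nums mask).2 + x)) := by
  unfold cgpSums
  have hlen : ((nums ++ [x]).length : Int) = (nums.length : Int) + 1 := by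
    simp
  rw [hlen, PySem.List.pyRange_one_succ_right (by positivity), List.foldl_append]
  have hcongr :
      (PySem.List.pyRange 0 (nums.length : Int)).foldl
        (fun s i =>
          if PySem.Int.band mask ((1 : Int) <<< i) ≠ 0 then
            (s.1 + PySem.List.pyGetD (nums ++ [x]) i 0, s.2)
          else (s.1, s.2 + PySem.List.pyGetD (nums ++ [x]) i 0)) ((0:Int), (0:Int))
      = (PySem.List.pyRange 0 (nums.length : Int)).foldl
        (fun s i =>
          if PySem.Int.band mask ((1 : Int) <<< i) ≠ 0 then
            (s.1 + PySem.List.pyGetD nums i 0, s.2)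
          else (s.1, s.2 + PySem.List.pyGetD nums i 0)) ((0:Int), (0:Int)) := by
    apply PySem.List.foldl_congr_mem
    intro acc i hi
    rw [PySem.List.mem_pyRange_one] at hi
    have hget : PySem.List.pyGetD (nums ++ [x]) i 0 = PySem.List.pyGetD nums i 0 := by
      rw [PySem.List.pyGetD_eq_getElem _ _ hi.1 (by simp; omega),
          PySem.List.pyGetD_eq_getElem _ _ hi.1 (by omega)]
      exact List.getElem_append_left (by omega)
    rw [hget]
  rw [hcongr]
  have hlast : PySem.List.pyGetD (nums ++ [x]) ((nums.length : Nat) : Int) 0 = x := by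
    rw [PySem.List.pyGetD_natCast]
    simp
  simp only [List.foldl_cons, List.foldl_nil]
  rw [hlast]

-- A mask's low bits alone determine `cgpSums`.
theorem cgpSums_congr (nums : List Int) (m m' : Int)
    (h : ∀ i : Nat, i < nums.length →
      PySem.Int.band m ((1 : Int) <<< ((i : Nat) : Int)) = PySem.Int.band m' ((1 : Int) <<< ((i : Nat) : Int))) :
    cgpSums nums m = cgpSums nums m' := by
  unfold cgpSums
  apply PySem.List.foldl_congr_mem
  intro acc i hi
  rw [PySem.List.mem_pyRange_one] at hi
  have hi' : i = ((i.toNat : Nat) : Int) := (Int.toNat_of_nonneg hi.1).symm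
  rw [hi', h i.toNat (by omega)]

theorem pvBand_zero_left (y : Int) : PySem.Int.band 0 y = 0 := by
  rw [PySem.Int.band_comm]; exact PySem.Int.band_zero y

theorem cgpSums_zero (nums : List Int) : cgpSums nums 0 = (0, nums.sum) := by
  induction nums using List.reverseRecOn with
  | nil => rfl
  | append_singleton l x ih =>
      rw [cgpSums_append, if_neg (by simp [pvBand_zero_left]), ih]
      simp

theorem cgpSums_total (nums : List Int) (mask : Int) :
    (cgpSums nums mask).1 + (cgpSums nums mask).2 = nums.sum := by
  induction nums using List.reverseRecOn with
  | nil => rfl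
  | append_singleton l x ih =>
      rw [cgpSums_append]
      split <;> simp <;> omega

theorem pvBand_low (j n : Nat) (h : j < 2 ^ n) :
    PySem.Int.band (j : Int) ((1 : Int) <<< ((n : Nat) : Int)) = 0 := by
  rw [pvShift, PySem.Int.band_natCast]
  simp [Nat.and_two_pow, Nat.testBit_lt_two_pow h]

theorem pvBand_high (j n : Nat) (h : j < 2 ^ n) :
    PySem.Int.band ((2 ^ n + j : Nat) : Int) ((1 : Int) <<< ((n : Nat) : Int)) ≠ 0 := by
  rw [pvShift, PySem.Int.band_natCast]
  simp [Nat.and_two_pow, Nat.testBit_two_pow_add_eq, Nat.testBit_lt_two_pow h]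

theorem pvBand_shift (j n t : Nat) (h : t < n) :
    PySem.Int.band ((2 ^ n + j : Nat) : Int) ((1 : Int) <<< ((t : Nat) : Int)) =
      PySem.Int.band (j : Int) ((1 : Int) <<< ((t : Nat) : Int)) := by
  rw [pvShift, PySem.Int.band_natCast, PySem.Int.band_natCast]
  simp [Nat.and_two_pow, Nat.testBit_two_pow_add_gt h]

-- the sums of A's masks 0 .. 2^n - 1, in mask order, are exactly B's doubling list
theorem cgpSums_map_range (nums : List Int) :
    (List.range (2 ^ nums.length)).map (fun j => (cgpSums nums ((j : Nat) : Int)).1) = pvDbl nums := by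
  induction nums using List.reverseRecOn with
  | nil => rfl
  | append_singleton l x ih =>
      have hlenn : (l ++ [x]).length = l.length + 1 := by simp
      have hpow : 2 ^ (l ++ [x]).length = 2 ^ l.length + 2 ^ l.length := by
        rw [hlenn, pow_succ]; ring
      rw [hpow, List.range_add, List.map_append, pvDbl_append, ← ih]
      congr 1
      · -- low masks: last bit clear, same sum1
        apply List.map_congr_left
        intro j hj
        rw [List.mem_range] at hj
        rw [cgpSums_append, if_neg (by simp [pvBand_low j l.length hj])]
      · -- high masks: last bit set, sum1 + x
        rw [List.map_map, List.map_map]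
        apply List.map_congr_left
        intro j hj
        rw [List.mem_range] at hj
        simp only [Function.comp]
        push_cast
        rw [show ((2 : Int) ^ l.length + (j : Int)) = (((2 ^ l.length + j : Nat)) : Int) by push_cast; ring]
        rw [cgpSums_append, if_pos (pvBand_high j l.length hj)]
        have hlow : cgpSums l (((2 ^ l.length + j : Nat)) : Int) = cgpSums l ((j : Nat) : Int) := by
          apply cgpSums_congr
          intro t ht
          exact pvBand_shift j l.length t ht
        rw [hlow]

-- abbreviations for the two predicates, proofs only (reducible so Decidable inference sees through)
abbrev pvP (nums : List Int) (k mask : Int) : Prop :=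
  (cgpSums nums mask).1 ≥ k ∧ (cgpSums nums mask).2 ≥ k

abbrev pvQ (nums : List Int) (k s : Int) : Prop := s ≥ k ∧ nums.sum - s ≥ k

theorem pvP_iff (nums : List Int) (k mask : Int) :
    pvP nums k mask ↔ pvQ nums k ((cgpSums nums mask).1) := by
  have h := cgpSums_total nums mask
  unfold pvP pvQ
  omega

-- the count over all masks 0..2^n-1 is the countP of B's doubling list
theorem pvCountP_all (nums : List Int) (k : Int) :
    ((PySem.List.pyRange 0 ((2 ^ nums.length : Nat) : Int)).countP fun mask => decide (pvP nums k mask))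
      = (pvDbl nums).countP fun s => decide (pvQ nums k s) := by
  rw [PySem.List.pyRange_one]
  have h0 : (((2 ^ nums.length : Nat) : Int) - 0).toNat = 2 ^ nums.length := by
    rw [sub_zero, Int.toNat_natCast]
  rw [h0, List.countP_map]
  have hcongr : ((List.range (2 ^ nums.length)).countP
        ((fun mask => decide (pvP nums k mask)) ∘ fun k0 : Nat => (0 : Int) + ((k0 : Nat) : Int)))
      = ((List.range (2 ^ nums.length)).countP
        ((fun s => decide (pvQ nums k s)) ∘ fun j => (cgpSums nums ((j : Nat) : Int)).1)) := by
    apply List.countP_congr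
    intro j _
    simp only [Function.comp, zero_add, decide_eq_true_eq]
    exact pvP_iff nums k ((j : Nat) : Int)
  rw [hcongr, ← List.countP_map, cgpSums_map_range]

theorem pvCount_eq (nums : List Int) (k : Int) :
    countGreatPartitions nums k = countGreatPartitions_alt nums k := by
  show PySem.Int.mod (PySem.Int.floordiv
      ((PySem.List.pyRange 1 ((1 : Int) <<< ((nums.length : Nat) : Int))).foldl
        (fun count mask =>
          let s := cgpSums nums mask
          if s.1 ≥ k ∧ s.2 ≥ k then count + 1 else count) 0) 2) (10 ^ 9 + 7)
    = PySem.Int.mod (PySem.Int.floordiv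
        ((if k ≤ 0 ∧ 0 ≤ nums.sum - k then
            ((nums.foldl (fun out x => out ++ out.map (fun s => s + x)) [0]).foldl
              (fun t s => if s ≥ k ∧ nums.sum - s ≥ k then t + 1 else t) 0) - 1
          else
            (nums.foldl (fun out x => out ++ out.map (fun s => s + x)) [0]).foldl
              (fun t s => if s ≥ k ∧ nums.sum - s ≥ k then t + 1 else t) 0)) 2) (10 ^ 9 + 7)
  apply congrArg (fun z => PySem.Int.mod (PySem.Int.floordiv z 2) (10 ^ 9 + 7))
  have hsh : (1 : Int) <<< ((nums.length : Nat) : Int) = ((2 ^ nums.length : Nat) : Int) :=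
    pvShift nums.length
  rw [hsh]
  have hA : (PySem.List.pyRange 1 ((2 ^ nums.length : Nat) : Int)).foldl
      (fun count mask =>
        let s := cgpSums nums mask
        if s.1 ≥ k ∧ s.2 ≥ k then count + 1 else count) 0
      = (0 : Int) + (((PySem.List.pyRange 1 ((2 ^ nums.length : Nat) : Int)).countP
          fun mask => decide (pvP nums k mask)) : Int) :=
    PySem.List.foldl_ite_add_one (pvP nums k) _ 0
  have hB : (nums.foldl (fun out x => out ++ out.map (fun s => s + x)) [0]).foldl
      (fun t s => if s ≥ k ∧ nums.sum - s ≥ k then t + 1 else t) 0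
      = (0 : Int) + (((pvDbl nums).countP fun s => decide (pvQ nums k s)) : Int) :=
    PySem.List.foldl_ite_add_one (pvQ nums k) (pvDbl nums) 0
  rw [hA, hB]
  have hpos : (0 : Int) < ((2 ^ nums.length : Nat) : Int) := by positivity
  have hall := pvCountP_all nums k
  rw [PySem.List.pyRange_one_cons hpos, List.countP_cons] at hall
  simp only [zero_add] at hall
  have hzero : decide (pvP nums k 0) = decide (0 ≥ k ∧ nums.sum ≥ k) := by
    rw [decide_eq_decide]
    unfold pvP
    rw [cgpSums_zero]
  rw [hzero] at hall
  rcases Decidable.em (k ≤ 0 ∧ 0 ≤ nums.sum - k) with hc | hc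
  · rw [if_pos hc]
    have hd : decide (0 ≥ k ∧ nums.sum ≥ k) = true := by
      rw [decide_eq_true_iff]; omega
    rw [hd] at hall
    simp at hall ⊢
    omega
  · rw [if_neg hc]
    have hd : decide (0 ≥ k ∧ nums.sum ≥ k) = false := by
      rw [decide_eq_false_iff_not]; omega
    rw [hd] at hall
    simp at hall ⊢
    omega

-- ===== VERDICT (by name: the statement is the Claim_ definition above) =====
theorem countGreatPartitions_spec : Claim_equal_countGreatPartitions := by
  intro nums k _
  unfold Spec_countGreatPartitions
  exact pvCount_eq nums k
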